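-- pv_equiv track=rewrite | github.com/ZecaCosta/restaurant-orders | src/analyze_log.py | pratos_sem_pedidos
-- ===== SOURCE A (Python) =====
-- def pratos_sem_pedidos(nome_do_cliente, lista_de_pedido):
--     todos_os_pratos = {pedido["prato_pedido"] for pedido in lista_de_pedido}
--     pratos_pedidos = {
--         pedido["prato_pedido"]
--         for pedido in lista_de_pedido
--         if pedido["nome_do_cliente"] == nome_do_cliente
--     }
--     pratos_sem_pedidos = todos_os_pratos.symmetric_difference(pratos_pedidos)
--     return pratos_sem_pedidos
-- ===== SOURCE B (Python) =====
-- def pratos_sem_pedidos(nome_do_cliente, lista_de_pedido):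
--     tabela = {}
--     for pedido in lista_de_pedido:
--         prato = pedido["prato_pedido"]
--         tabela[prato] = tabela.get(prato, False) or (
--             pedido["nome_do_cliente"] == nome_do_cliente
--         )
--     return {prato for prato, pedido_feito in tabela.items() if not pedido_feito}
-- ===== Notes on version B (the rewrite author's own statement) =====
-- stated objective: alternative
-- what changed: Replaces A's two set comprehensions plus symmetric_difference with a single pass that builds one dict from dish to 'ordered by this client' flag and returns the dishes whose flag stayed False.
import Mathlib
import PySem

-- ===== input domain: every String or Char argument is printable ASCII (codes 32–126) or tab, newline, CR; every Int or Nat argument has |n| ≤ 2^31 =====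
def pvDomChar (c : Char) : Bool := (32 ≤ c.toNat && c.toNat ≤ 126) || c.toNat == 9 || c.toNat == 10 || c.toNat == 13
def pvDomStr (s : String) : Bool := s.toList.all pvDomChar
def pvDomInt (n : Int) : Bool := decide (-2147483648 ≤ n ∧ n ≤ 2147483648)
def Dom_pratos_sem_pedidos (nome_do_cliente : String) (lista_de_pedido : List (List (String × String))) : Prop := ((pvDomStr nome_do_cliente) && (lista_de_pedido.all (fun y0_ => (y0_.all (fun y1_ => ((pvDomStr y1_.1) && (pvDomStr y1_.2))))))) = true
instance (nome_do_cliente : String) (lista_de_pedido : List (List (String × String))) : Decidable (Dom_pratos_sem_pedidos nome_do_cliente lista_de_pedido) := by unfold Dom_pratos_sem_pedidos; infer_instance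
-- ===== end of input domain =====

-- B replaces A's two set comprehensions + symmetric_difference by one pass that builds a
-- dish → 'ordered by this client' table and keeps the dishes whose flag stayed False
-- (same cost, different decomposition; return-value equivalence is what is proved).

-- ===== PORT A =====
def pratos_sem_pedidos (nome_do_cliente : String) (lista_de_pedido : List (List (String × String))) : List String :=
  let todos_os_pratos : PySem.Set String :=
    PySem.Set.ofList (lista_de_pedido.map (fun pedido => (PySem.Dict.mk pedido).getD "prato_pedido" ""))
  let pratos_pedidos : PySem.Set String :=
    PySem.Set.ofList
      ((lista_de_pedido.filter
          (fun pedido => (PySem.Dict.mk pedido).getD "nome_do_cliente" "" == nome_do_cliente)).map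
        (fun pedido => (PySem.Dict.mk pedido).getD "prato_pedido" ""))
  PySem.Set.symmDiff todos_os_pratos pratos_pedidos

-- ===== PORT B =====
def pratos_sem_pedidos_alt (nome_do_cliente : String) (lista_de_pedido : List (List (String × String))) : List String :=
  let tabela : PySem.Dict String Bool :=
    lista_de_pedido.foldl
      (fun tabela pedido =>
        tabela.insert ((PySem.Dict.mk pedido).getD "prato_pedido" "")
          (tabela.getD ((PySem.Dict.mk pedido).getD "prato_pedido" "") false
            || ((PySem.Dict.mk pedido).getD "nome_do_cliente" "" == nome_do_cliente)))
      PySem.Dict.empty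
  PySem.Set.ofList ((tabela.items.filter (fun pr => !pr.2)).map (fun pr => pr.1))

-- ===== PRECONDITION & SPEC =====
-- Pre_ excludes exactly the inputs containing an order without a "prato_pedido" or a
-- "nome_do_cliente" key, on which Python A raises KeyError.
def Pre_pratos_sem_pedidos (nome_do_cliente : String) (lista_de_pedido : List (List (String × String))) : Prop :=
  ∀ pedido ∈ lista_de_pedido, "prato_pedido" ∈ pedido.map Prod.fst ∧ "nome_do_cliente" ∈ pedido.map Prod.fst
instance (nome_do_cliente : String) (lista_de_pedido : List (List (String × String))) : Decidable (Pre_pratos_sem_pedidos nome_do_cliente lista_de_pedido) := by unfold Pre_pratos_sem_pedidos; infer_instance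

def pvWitness_pratos_sem_pedidos : String × (List (List (String × String))) :=
  ("ana", [[("prato_pedido", "arroz"), ("nome_do_cliente", "bia")],
           [("prato_pedido", "feijao"), ("nome_do_cliente", "ana")]])

def Spec_pratos_sem_pedidos (nome_do_cliente : String) (lista_de_pedido : List (List (String × String))) (out : List String) : Prop := out = pratos_sem_pedidos_alt nome_do_cliente lista_de_pedido
instance (nome_do_cliente : String) (lista_de_pedido : List (List (String × String))) (out : List String) : Decidable (Spec_pratos_sem_pedidos nome_do_cliente lista_de_pedido out) := by unfold Spec_pratos_sem_pedidos; infer_instance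

-- ===== CLAIM (what is proved, stated in full; the proofs are below) =====
def Claim_equal_pratos_sem_pedidos : Prop := ∀ (nome_do_cliente : String) (lista_de_pedido : List (List (String × String))), Dom_pratos_sem_pedidos nome_do_cliente lista_de_pedido → Pre_pratos_sem_pedidos nome_do_cliente lista_de_pedido → Spec_pratos_sem_pedidos nome_do_cliente lista_de_pedido (pratos_sem_pedidos nome_do_cliente lista_de_pedido)

-- ===== LEMMAS AND PROOFS =====

-- the dish named by an order, and "this order was placed by the client"
def pvPrato (pedido : List (String × String)) : String := (PySem.Dict.mk pedido).getD "prato_pedido" ""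
def pvDoCliente (nome : String) (pedido : List (String × String)) : Bool :=
  (PySem.Dict.mk pedido).getD "nome_do_cliente" "" == nome

-- B's table maps each dish to "some order for it was placed by the client"
lemma tabela_getD (nome : String) (l : List (List (String × String)))
    (d : PySem.Dict String Bool) (p : String) :
    (l.foldl (fun t pedido => t.insert (pvPrato pedido)
        (t.getD (pvPrato pedido) false || pvDoCliente nome pedido)) d).getD p false
      = (d.getD p false || l.any (fun pedido => pvPrato pedido == p && pvDoCliente nome pedido)) := by
  induction l generalizing d with
  | nil => simp
  | cons x xs ih =>
    simp only [List.foldl_cons, List.any_cons, ih]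
    rw [PySem.Dict.getD_insert]
    by_cases h : p = pvPrato x
    · subst h
      simp [Bool.or_assoc, Bool.or_comm, Bool.or_left_comm]
    · have hb : (pvPrato x == p) = false := by
        simp only [beq_eq_false_iff_ne, ne_eq]; exact fun hh => h hh.symm
      simp [h, hb]

-- both ports compute the first-occurrence dish list filtered by "not ordered by the client"
theorem ports_agree (nome : String) (lista : List (List (String × String))) :
    PySem.Set.symmDiff (PySem.Set.ofList (lista.map pvPrato))
        (PySem.Set.ofList ((lista.filter (pvDoCliente nome)).map pvPrato))
      = PySem.Set.ofList
          ((((lista.foldl (fun t pedido => t.insert (pvPrato pedido)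
                (t.getD (pvPrato pedido) false || pvDoCliente nome pedido))
              PySem.Dict.empty).items.filter (fun pr => !pr.2)).map (fun pr => pr.1))) := by
  set F : String → Bool := fun k => lista.any (fun pedido => pvPrato pedido == k && pvDoCliente nome pedido) with hF
  set tabela := lista.foldl (fun t pedido => t.insert (pvPrato pedido)
      (t.getD (pvPrato pedido) false || pvDoCliente nome pedido)) PySem.Dict.empty with htab
  have hkeys : tabela.keys = PySem.Set.ofList (lista.map pvPrato) := by
    rw [htab, PySem.Dict.keys_foldl_insert_key lista pvPrato
      (fun t pedido => t.getD (pvPrato pedido) false || pvDoCliente nome pedido) PySem.Dict.empty]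
    simp [PySem.Dict.keys, PySem.Dict.empty, PySem.Set.update_nil_left]
  have hnd : tabela.keys.Nodup := by
    rw [hkeys]; exact PySem.Set.nodup_ofList _
  have hval : ∀ p, tabela.getD p false = F p := by
    intro p
    rw [htab, tabela_getD]
    simp [hF]
  have hitems : tabela.items = tabela.keys.map (fun k => (k, F k)) := by
    rw [PySem.Dict.items_eq_map_keys tabela hnd false]
    exact List.map_congr_left (fun k _ => by rw [hval])
  have hR : ((tabela.items.filter (fun pr => !pr.2)).map (fun pr => pr.1))
      = (PySem.Set.ofList (lista.map pvPrato)).filter (fun k => !F k) := by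
    rw [hitems, hkeys, List.filter_map, List.map_map]
    simp only [Function.comp_def]
    simp
  rw [hR, PySem.Set.ofList_eq_self_of_nodup _ ((PySem.Set.nodup_ofList _).filter _)]
  unfold PySem.Set.symmDiff PySem.Set.diff
  have hsub : ∀ x ∈ PySem.Set.ofList ((lista.filter (pvDoCliente nome)).map pvPrato),
      x ∈ PySem.Set.ofList (lista.map pvPrato) := by
    intro x hx
    rw [PySem.Set.mem_ofList] at hx ⊢
    rcases List.mem_map.mp hx with ⟨ped, hped, rfl⟩
    exact List.mem_map_of_mem (List.mem_of_mem_filter hped)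
  have h2 : (PySem.Set.ofList ((lista.filter (pvDoCliente nome)).map pvPrato)).filter
      (fun x => !(PySem.Set.ofList (lista.map pvPrato)).contains x) = [] := by
    rw [List.filter_eq_nil_iff]
    intro x hx
    simp [hsub x hx]
  rw [h2, List.append_nil]
  apply List.filter_congr
  intro x hx
  have hc : (PySem.Set.ofList ((lista.filter (pvDoCliente nome)).map pvPrato)).contains x = F x := by
    rw [Bool.eq_iff_iff, PySem.Set.contains_iff, PySem.Set.mem_ofList, hF]
    simp only [List.mem_map, List.mem_filter, List.any_eq_true, Bool.and_eq_true, beq_iff_eq]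
    constructor
    · rintro ⟨ped, ⟨hm, hc⟩, rfl⟩; exact ⟨ped, hm, rfl, hc⟩
    · rintro ⟨ped, hm, rfl, hc⟩; exact ⟨ped, ⟨hm, hc⟩, rfl⟩
  rw [hc]

-- ===== VERDICT (by name: the statement is the Claim_ definition above) =====
theorem pratos_sem_pedidos_spec : Claim_equal_pratos_sem_pedidos := by
  intro nome lista _ _
  exact ports_agree nome lista
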